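-- pv_equiv track=rewrite | github.com/siddharth1199/aoc_2017 | optum_aoc/2015/day03/g.py | robo_santa
-- ===== SOURCE A (Python) =====
-- def update_houses(houses, pos):
--     if pos in houses.keys():
--         houses[pos] += 1
--     else:
--         houses[pos] = 1
--     return pos, houses
--
-- def houses_with_prize(data, pos, houses):
--     for c in data[0]:
--         (x, y) = pos
--         if c == '^':
--             pos = (x, y + 1)
--         elif c == 'v':
--             pos = (x, y - 1)
--         elif c == '<':
--             pos = (x - 1, y)
--         elif c == '>':
--             pos = (x + 1, y)
--         pos, houses = update_houses(houses, pos)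
--     return pos, houses
--
-- def robo_santa(data, houses):
--     pos_santa = (0, 0)
--     pos_robo = (0, 0)
--     santa = True
--     robo = False
--     for c in data[0]:
--         if santa:
--             pos_santa, houses  = houses_with_prize(c, pos_santa, houses)
--             santa = False
--             robo  = True
--         elif robo:
--             pos_robo, houses   = houses_with_prize(c, pos_robo, houses)
--             robo  = False
--             santa = True
--     return houses
-- ===== SOURCE B (Python) =====
-- # B: staged decomposition. Split the move string into santa's (even-index) and robo's
-- # (odd-index) subsequences, compute each mover's whole trajectory independently as a
-- # list of stops, interleave the two stop lists back into A's visiting order, then do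
-- # one counting pass over that list. Mutates `houses` in place like A; start not counted.
-- DELTAS = {'^': (0, 1), 'v': (0, -1), '<': (-1, 0), '>': (1, 0)}
--
-- def trajectory(path):
--     x = y = 0
--     stops = []
--     for c in path:
--         dx, dy = DELTAS.get(c, (0, 0))
--         x += dx
--         y += dy
--         stops.append((x, y))
--     return stops
--
-- def robo_santa(data, houses):
--     moves = data[0]
--     santa_stops = trajectory(moves[0::2])
--     robo_stops = trajectory(moves[1::2])
--     order = []
--     for s, r in zip(santa_stops, robo_stops):
--         order.append(s)
--         order.append(r)
--     order.extend(santa_stops[len(robo_stops):])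
--     for p in order:
--         houses[p] = houses.get(p, 0) + 1
--     return houses
-- ===== Notes on version B (the rewrite author's own statement) =====
-- stated objective: alternative
-- what changed: Replaces A's single alternating loop (boolean santa/robo flags, per-character helper dispatch, membership-test update) with staged passes: split the move string into even/odd-index subsequences, compute each mover's full trajectory independently, interleave the two stop lists back into visit order, then count all stops in one final pass.
-- outside the precondition, e.g. on robo_santa([], {}): A raises IndexError, B raises IndexError
import Mathlib
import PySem

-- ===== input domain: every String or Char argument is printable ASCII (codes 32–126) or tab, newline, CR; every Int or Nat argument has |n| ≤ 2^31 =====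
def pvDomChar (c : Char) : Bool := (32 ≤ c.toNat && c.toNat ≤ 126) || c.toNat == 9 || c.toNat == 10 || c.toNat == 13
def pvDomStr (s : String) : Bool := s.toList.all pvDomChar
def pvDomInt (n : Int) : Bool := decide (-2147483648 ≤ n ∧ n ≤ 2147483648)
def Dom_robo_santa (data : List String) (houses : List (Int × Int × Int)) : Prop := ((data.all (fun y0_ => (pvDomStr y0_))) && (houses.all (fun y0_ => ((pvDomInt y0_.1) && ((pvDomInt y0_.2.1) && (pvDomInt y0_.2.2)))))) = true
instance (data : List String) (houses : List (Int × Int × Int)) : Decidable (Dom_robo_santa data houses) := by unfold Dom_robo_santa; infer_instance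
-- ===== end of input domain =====

-- B replaces A's single alternating loop (flags + per-character helper dispatch +
-- membership-test update) by staged passes: split into even/odd-index subsequences,
-- compute each mover's trajectory, interleave the stops, then one counting pass;
-- equivalence is about the returned dict value (both Pythons mutate `houses` alike).

-- ===== PORT A =====
-- boundary converters: the `houses` dict travels as a (x, y, count) association list
def pvToDict (hs : List (Int × Int × Int)) : PySem.Dict (Int × Int) Int :=
  PySem.Dict.mk (hs.map (fun t => ((t.1, t.2.1), t.2.2)))

def pvOfDict (d : PySem.Dict (Int × Int) Int) : List (Int × Int × Int) :=
  d.items.map (fun p => (p.1.1, p.1.2, p.2))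

def update_houses (houses : PySem.Dict (Int × Int) Int) (pos : Int × Int) :
    (Int × Int) × PySem.Dict (Int × Int) Int :=
  if houses.contains pos then (pos, houses.insert pos (houses.getD pos 0 + 1))
  else (pos, houses.insert pos 1)

-- Python's `for c in data[0]`: data[0] is the first character as a 1-char string, so the
-- loop visits exactly that character; on the empty string Python raises (never reached:
-- robo_santa always passes a 1-char string), modelled by the empty fold over Option.toList.
def houses_with_prize (data : List Char) (pos : Int × Int)
    (houses : PySem.Dict (Int × Int) Int) : (Int × Int) × PySem.Dict (Int × Int) Int :=
  ((PySem.List.pyGet? data 0).toList).foldl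
    (fun st c =>
      let pos' :=
        if c = '^' then (st.1.1, st.1.2 + 1)
        else if c = 'v' then (st.1.1, st.1.2 - 1)
        else if c = '<' then (st.1.1 - 1, st.1.2)
        else if c = '>' then (st.1.1 + 1, st.1.2)
        else st.1
      update_houses st.2 pos')
    (pos, houses)

-- loop body of A's for-loop; state = (pos_santa, pos_robo, santa, robo, houses)
def robo_step (st : (Int × Int) × (Int × Int) × Bool × Bool × PySem.Dict (Int × Int) Int)
    (c : Char) : (Int × Int) × (Int × Int) × Bool × Bool × PySem.Dict (Int × Int) Int :=
  if st.2.2.1 then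
    let r := houses_with_prize [c] st.1 st.2.2.2.2
    (r.1, st.2.1, false, true, r.2)
  else if st.2.2.2.1 then
    let r := houses_with_prize [c] st.2.1 st.2.2.2.2
    (st.1, r.1, true, false, r.2)
  else st

def robo_santa (data : List String) (houses : List (Int × Int × Int)) :
    List (Int × Int × Int) :=
  match PySem.List.pyGet? data 0 with
  | none => pvOfDict (pvToDict houses)   -- Python raises IndexError here; excluded by Pre_
  | some s =>
    (pvOfDict
      ((s.toList.foldl robo_step ((0, 0), (0, 0), true, false, pvToDict houses)).2.2.2.2))

-- ===== PORT B =====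
def pvDeltas : PySem.Dict Char (Int × Int) :=
  PySem.Dict.ofList [('^', (0, 1)), ('v', (0, -1)), ('<', (-1, 0)), ('>', (1, 0))]

-- moves[0::2] / moves[1::2]: extended step-2 slices, ported by hand (exact: the
-- characters at even / odd indices, in order)
mutual
def pvEvens : List Char → List Char
  | [] => []
  | a :: l => a :: pvOdds l
def pvOdds : List Char → List Char
  | [] => []
  | _ :: l => pvEvens l
end

-- Source B's trajectory: cumulative positions from (0, 0), appended to a growing list
def pvTrajectory (path : List Char) : List (Int × Int) :=
  (path.foldl
    (fun (st : (Int × Int) × List (Int × Int)) c =>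
      let d := pvDeltas.getD c (0, 0)
      let p := (st.1.1 + d.1, st.1.2 + d.2)
      (p, st.2 ++ [p]))
    ((0, 0), [])).2

def robo_santa_alt (data : List String) (houses : List (Int × Int × Int)) :
    List (Int × Int × Int) :=
  match PySem.List.pyGet? data 0 with
  | none => pvOfDict (pvToDict houses)   -- data[0] raises IndexError in B too; outside Pre_
  | some s =>
    let santaStops := pvTrajectory (pvEvens s.toList)
    let roboStops := pvTrajectory (pvOdds s.toList)
    let order :=
      ((santaStops.zip roboStops).foldl (fun out p => out ++ [p.1, p.2]) []) ++
        PySem.List.slice santaStops (some (roboStops.length : Int)) none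
    pvOfDict (order.foldl (fun d p => d.insert p (d.getD p 0 + 1)) (pvToDict houses))

-- ===== PRECONDITION & SPEC =====
-- data = [] is excluded because Python A raises IndexError on data[0]; duplicate (x,y)
-- keys are excluded because the association list encodes a Python dict, whose keys are
-- distinct (such lists do not arise from any Python input).
def Pre_robo_santa (data : List String) (houses : List (Int × Int × Int)) : Prop :=
  data ≠ [] ∧ (houses.map (fun t => (t.1, t.2.1))).Nodup

instance (data : List String) (houses : List (Int × Int × Int)) :
    Decidable (Pre_robo_santa data houses) := by unfold Pre_robo_santa; infer_instance

def pvWitness_robo_santa : List String × (List (Int × Int × Int)) :=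
  ([">>^v<x"], [(1, 0, 2), (0, 1, 1)])

def Spec_robo_santa (data : List String) (houses : List (Int × Int × Int))
    (out : List (Int × Int × Int)) : Prop := out = robo_santa_alt data houses

instance (data : List String) (houses : List (Int × Int × Int))
    (out : List (Int × Int × Int)) : Decidable (Spec_robo_santa data houses out) := by
  unfold Spec_robo_santa; infer_instance

-- ===== CLAIM (what is proved, stated in full; the proofs are below) =====
def Claim_equal_robo_santa : Prop := ∀ (data : List String) (houses : List (Int × Int × Int)), Dom_robo_santa data houses → Pre_robo_santa data houses → Spec_robo_santa data houses (robo_santa data houses)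

-- ===== LEMMAS AND PROOFS =====

-- one move: position shifted by the delta-table entry (identity for other characters)
def pvMove (p : Int × Int) (c : Char) : Int × Int :=
  (p.1 + (pvDeltas.getD c (0, 0)).1, p.2 + (pvDeltas.getD c (0, 0)).2)

-- trajectory from an arbitrary start, recursively
def pvTrajAux (p : Int × Int) : List Char → List (Int × Int)
  | [] => []
  | c :: l => pvMove p c :: pvTrajAux (pvMove p c) l

-- interleaved visit order: alternate stops, then santa's leftover tail
def pvOrder : List (Int × Int) → List (Int × Int) → List (Int × Int)
  | s, [] => s
  | [], _ :: _ => []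
  | a :: s, b :: r => a :: b :: pvOrder s r

-- the one counting pass
def pvCount (ps : List (Int × Int)) (d : PySem.Dict (Int × Int) Int) :
    PySem.Dict (Int × Int) Int :=
  ps.foldl (fun d p => d.insert p (d.getD p 0 + 1)) d

-- A's membership-test-then-update equals the unconditional get-default insert
theorem update_houses_eq (d : PySem.Dict (Int × Int) Int) (p : Int × Int) :
    update_houses d p = (p, d.insert p (d.getD p 0 + 1)) := by
  unfold update_houses
  rcases hc : d.contains p
  · simp [PySem.Dict.getD_of_not_contains d 0 hc]
  · simp

-- B's delta-table lookup, written out per character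
theorem pvDeltas_getD (c : Char) : pvDeltas.getD c (0, 0) =
    (if c = '^' then ((0 : Int), (1 : Int)) else if c = 'v' then (0, -1)
     else if c = '<' then (-1, 0) else if c = '>' then (1, 0) else (0, 0)) := by
  have hD : pvDeltas = PySem.Dict.mk
      [('^', ((0 : Int), (1 : Int))), ('v', (0, -1)), ('<', (-1, 0)), ('>', (1, 0))] := by
    decide
  by_cases h1 : c = '^'
  · subst h1; decide
  by_cases h2 : c = 'v'
  · subst h2; decide
  by_cases h3 : c = '<'
  · subst h3; decide
  by_cases h4 : c = '>'
  · subst h4; decide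
  have n1 : ('^' == c) = false := beq_eq_false_iff_ne.mpr (Ne.symm h1)
  have n2 : ('v' == c) = false := beq_eq_false_iff_ne.mpr (Ne.symm h2)
  have n3 : ('<' == c) = false := beq_eq_false_iff_ne.mpr (Ne.symm h3)
  have n4 : ('>' == c) = false := beq_eq_false_iff_ne.mpr (Ne.symm h4)
  simp [hD, h1, h2, h3, h4, PySem.Dict.getD_eq_get?_getD, n1, n2, n3, n4,
    PySem.Dict.get?]

-- A's per-character helper call = move by the table, then get-default insert
theorem houses_with_prize_eq (c : Char) (pos : Int × Int)
    (d : PySem.Dict (Int × Int) Int) : houses_with_prize [c] pos d =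
      (pvMove pos c, d.insert (pvMove pos c) (d.getD (pvMove pos c) 0 + 1)) := by
  unfold houses_with_prize pvMove
  simp only [PySem.List.pyGet?_zero_cons, Option.toList_some, List.foldl_cons,
    List.foldl_nil, update_houses_eq, pvDeltas_getD]
  split_ifs with h1 h2 h3 h4 <;> simp [sub_eq_add_neg]

-- B's trajectory fold, with explicit start and accumulator
theorem pvTrajectory_foldl : ∀ (l : List Char) (p : Int × Int) (out : List (Int × Int)),
    (l.foldl
      (fun (st : (Int × Int) × List (Int × Int)) c =>
        let d := pvDeltas.getD c (0, 0)
        let p := (st.1.1 + d.1, st.1.2 + d.2)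
        (p, st.2 ++ [p]))
      (p, out)).2 = out ++ pvTrajAux p l
  | [], p, out => by simp [pvTrajAux]
  | c :: l, p, out => by
    simp only [List.foldl_cons, pvTrajAux]
    rw [pvTrajectory_foldl l]
    simp [pvMove]

theorem pvTrajectory_eq (l : List Char) : pvTrajectory l = pvTrajAux (0, 0) l := by
  unfold pvTrajectory
  rw [pvTrajectory_foldl]
  simp

-- B's zip-interleave-plus-tail equals the recursive visit order
theorem pvOrder_eq : ∀ (s r : List (Int × Int)),
    ((s.zip r).foldl (fun out p => out ++ [p.1, p.2]) []) ++ s.drop r.length =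
      pvOrder s r
  | s, [] => by simp [pvOrder]
  | [], _ :: _ => by simp [pvOrder]
  | a :: s, b :: r => by
    have acc : ∀ (z : List ((Int × Int) × (Int × Int))) (out : List (Int × Int)),
        z.foldl (fun out p => out ++ [p.1, p.2]) out =
          out ++ z.foldl (fun out p => out ++ [p.1, p.2]) [] := by
      intro z
      induction z with
      | nil => simp
      | cons hd tl ih => intro out; simp only [List.foldl_cons, List.nil_append]; rw [ih, ih [hd.1, hd.2]]; simp
    simp only [List.zip_cons_cons, List.foldl_cons, List.length_cons, List.drop_succ_cons,
      pvOrder, List.nil_append]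
    rw [acc]
    simpa using pvOrder_eq s r

-- trajectories of the even/odd split: one cons of each per two characters
theorem pvEvens_cons₂ (a b : Char) (l : List Char) :
    pvEvens (a :: b :: l) = a :: pvEvens l := rfl
theorem pvOdds_cons₂ (a b : Char) (l : List Char) :
    pvOdds (a :: b :: l) = b :: pvOdds l := rfl

-- MAIN: A's alternating fold = counting pass over the interleaved trajectories
theorem main_eq : ∀ (l : List Char) (ps pr : Int × Int)
    (d : PySem.Dict (Int × Int) Int),
    (l.foldl robo_step (ps, pr, true, false, d)).2.2.2.2 =
      pvCount (pvOrder (pvTrajAux ps (pvEvens l)) (pvTrajAux pr (pvOdds l))) d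
  | [], ps, pr, d => rfl
  | [a], ps, pr, d => by
    simp [List.foldl, robo_step, houses_with_prize_eq, pvEvens, pvOdds, pvTrajAux,
      pvOrder, pvCount]
  | a :: b :: l, ps, pr, d => by
    simp only [List.foldl_cons]
    have h1 : robo_step (ps, pr, true, false, d) a =
        (pvMove ps a, pr, false, true,
          d.insert (pvMove ps a) (d.getD (pvMove ps a) 0 + 1)) := by
      simp [robo_step, houses_with_prize_eq]
    set d1 := d.insert (pvMove ps a) (d.getD (pvMove ps a) 0 + 1) with hd1
    have h2 : robo_step (pvMove ps a, pr, false, true, d1) b =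
        (pvMove ps a, pvMove pr b, true, false,
          d1.insert (pvMove pr b) (d1.getD (pvMove pr b) 0 + 1)) := by
      simp [robo_step, houses_with_prize_eq]
    rw [h1, h2, main_eq l]
    simp [pvEvens_cons₂, pvOdds_cons₂, pvTrajAux, pvOrder, pvCount, hd1]
termination_by l => l.length

-- ===== VERDICT (by name: the statement is the Claim_ definition above) =====
theorem robo_santa_spec : Claim_equal_robo_santa := by
  intro data houses _ _
  unfold Spec_robo_santa robo_santa robo_santa_alt
  cases h : PySem.List.pyGet? data 0 with
  | none => rfl
  | some s =>
    simp only [PySem.List.slice_from_natCast, pvTrajectory_eq, pvOrder_eq, main_eq]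
    rfl
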